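-- pv_equiv track=rewrite | github.com/Aasthaengg/IBMdataset | Python_codes/p03138/s582148825.py | solve
-- ===== SOURCE A (Python) =====
-- def solve(N, W, ws, vs):
--     # S[i] = (v, w): 価値v, 重さw
--     *S, = zip(vs, ws)
--
--     def make(S):
--         T = {0: 0}
--         for v, w in S:
--             # 価値v, 重さw
--             T0 = dict(T)
--             for k, val in T.items():
--                 if k + w > W:
--                     continue
--                 if k + w in T0:
--                     T0[k + w] = max(T0[k + w], val + v)
--                 else:
--                     T0[k + w] = val + v
--             T = T0
--         v = 0
--         R = []
--         for k in sorted(T):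
--             v = max(v, T[k])
--             # (重さk, 重さk以下での価値の最大v)
--             R.append((k, v))
--         return R
--
--     def solve(T0, T1):
--         T0.sort()
--         T1.sort(reverse=1)
--
--         it = iter(T1)
--         k1, v1 = next(it)
--         yield 0
--         for k0, v0 in T0:
--             # 重さの和がW以下になるようにスライドする
--             while k0 + k1 > W:
--                 k1, v1 = next(it)
--             yield v0 + v1
--
--     # ２つの集合に分けて、それぞれ全列挙
--     T0 = make(S[:N // 2])
--     T1 = make(S[N // 2:])
--
--     # 2つの全列挙を元に解を求める
--     return max(solve(T0, T1))
-- ===== SOURCE B (Python) =====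
-- import bisect
--
-- def solve(N, W, ws, vs):
--     items = list(zip(ws, vs))
--     half0, half1 = items[:N // 2], items[N // 2:]
--
--     def enum(half):
--         pairs = []
--         for mask in range(1 << len(half)):
--             tw = 0
--             tv = 0
--             ok = True
--             for i, (w, v) in enumerate(half):
--                 if mask >> i & 1:
--                     tw += w
--                     if tw > W:  # prune as soon as the running weight exceeds W
--                         ok = False
--                         break
--                     tv += v
--             if ok:
--                 pairs.append((tw, tv))
--         return pairs
--
--     left = sorted(enum(half0), key=lambda p: p[0])
--     weights = [w for w, _ in left]
--     best_to = []  # best_to[i] = max value among left[: i + 1]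
--     b = None
--     for _, v in left:
--         b = v if b is None else max(b, v)
--         best_to.append(b)
--
--     best = 0
--     for w1, v1 in enum(half1):
--         i = bisect.bisect_right(weights, W - w1)
--         if i > 0:
--             best = max(best, v1 + best_to[i - 1])
--     return best
-- ===== Notes on version B (the rewrite author's own statement) =====
-- stated objective: alternative
-- what changed: Per half, the incremental dict-of-weights DP is replaced by a direct bitmask enumeration of subsets (pruned as soon as the running weight exceeds W), and the two-pointer merge of the two prefix-maxed key lists is replaced by sort-by-weight + running-maximum array + bisect_right lookup per pair of the other half; B keeps one entry per subset instead of one per distinct weight, so it is not faster (and is slower when many subsets share a weight).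
-- outside the precondition, e.g. on solve(1, -1, [-2], [5]): A returns 5, B returns 5
import Mathlib
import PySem

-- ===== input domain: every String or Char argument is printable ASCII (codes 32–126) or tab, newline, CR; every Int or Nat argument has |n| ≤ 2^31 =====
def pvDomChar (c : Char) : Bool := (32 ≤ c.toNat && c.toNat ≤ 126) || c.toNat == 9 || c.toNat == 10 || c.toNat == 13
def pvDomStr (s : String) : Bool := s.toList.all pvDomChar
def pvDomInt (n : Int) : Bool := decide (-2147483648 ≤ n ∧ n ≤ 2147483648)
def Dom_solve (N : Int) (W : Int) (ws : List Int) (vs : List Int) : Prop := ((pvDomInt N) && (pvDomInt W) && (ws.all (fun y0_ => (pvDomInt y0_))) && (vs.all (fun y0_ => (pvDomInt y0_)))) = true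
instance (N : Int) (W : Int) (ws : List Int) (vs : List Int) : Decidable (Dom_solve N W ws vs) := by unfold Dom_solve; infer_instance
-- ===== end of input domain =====

-- B replaces the per-half dict DP and two-pointer merge by bitmask subset enumeration
-- plus sort-by-weight / running-max / bisect ("alternative": one entry per subset instead
-- of one per distinct weight, so not faster).

-- ===== PORT A =====
-- inner loop of make(): one item (v, w) folded into the weight -> best-value dict
def aStep (W : Int) (T : PySem.Dict Int Int) (vw : Int × Int) : PySem.Dict Int Int :=
  T.items.foldl (fun T0 kv =>
    if kv.1 + vw.2 > W then T0
    else
      match T0.get? (kv.1 + vw.2) with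
      | some x => T0.insert (kv.1 + vw.2) (max x (kv.2 + vw.1))
      | none => T0.insert (kv.1 + vw.2) (kv.2 + vw.1)) T

-- make(S): dict DP over the items, then (key, prefix-max value) over sorted keys
def aMake (W : Int) (S : List (Int × Int)) : List (Int × Int) :=
  let T := S.foldl (aStep W) (PySem.Dict.ofList [((0 : Int), (0 : Int))])
  let ks := PySem.List.sorted T.keys (fun k => k)
  (ks.foldl (fun acc k =>
      let v := max acc.2 (T.getD k 0)
      (acc.1 ++ [(k, v)], v)) (([] : List (Int × Int)), (0 : Int))).1

-- the 'while k0 + k1 > W: k1, v1 = next(it)' slide (none = StopIteration)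
def aSlide (W k0 : Int) : Int × Int → List (Int × Int) → Option ((Int × Int) × List (Int × Int))
  | c, rest =>
    if k0 + c.1 > W then
      match rest with
      | [] => none
      | p :: ps => aSlide W k0 p ps
    else some (c, rest)

-- the generator's for-loop over T0 (none = RuntimeError from StopIteration)
def aGo (W : Int) : Int × Int → List (Int × Int) → List (Int × Int) → Option (List Int)
  | _, _, [] => some []
  | c, it, q :: t0 =>
    match aSlide W q.1 c it with
    | none => none
    | some (c', it') => (aGo W c' it' t0).map (fun l => (q.2 + c'.2) :: l)

-- inner solve(T0, T1) followed by max(...): sort, sort(reverse), slide, max of 0 :: yields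
def aCombine (W : Int) (T0 T1 : List (Int × Int)) : Int :=
  let t0 := PySem.List.sorted2 T0 (fun p => p.1) (fun p => p.2)
  let t1 := PySem.List.sorted2 T1 (fun p => p.1) (fun p => p.2) true
  match t1 with
  | [] => 0  -- unreachable: T1 always holds the key 0, Python's first next() cannot fail
  | c :: it =>
    match aGo W c it t0 with
    | none => 0  -- Python raises RuntimeError here; happens only for W < 0, outside Pre_solve
    | some ys => (PySem.List.max? (0 :: ys) (fun y => y)).getD 0

def solve (N : Int) (W : Int) (ws : List Int) (vs : List Int) : Int :=
  let S := vs.zip ws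
  let mid := PySem.Int.floordiv N 2
  aCombine W (aMake W (PySem.List.slice S none (some mid)))
             (aMake W (PySem.List.slice S (some mid) none))

-- ===== PORT B =====
-- the inner 'for i, (w, v) in enumerate(half)' accumulation for one mask (none = pruned)
def bScan (W mask : Int) : List (Int × Int) → Nat → Int → Int → Option (Int × Int)
  | [], _, tw, tv => some (tw, tv)
  | p :: t, i, tw, tv =>
    if PySem.Int.band (mask >>> i) 1 ≠ 0 then
      (if tw + p.1 > W then none else bScan W mask t (i + 1) (tw + p.1) (tv + p.2))
    else bScan W mask t (i + 1) tw tv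

-- enum(half): all (weight, value) pairs of prefix-feasible subsets, by mask
def bEnum (W : Int) (half : List (Int × Int)) : List (Int × Int) :=
  (PySem.List.pyRange 0 ((1 : Int) <<< half.length) 1).foldl
    (fun acc mask =>
      match bScan W mask half 0 0 0 with
      | some p => acc ++ [p]
      | none => acc) []

-- sort-by-weight, running-max array, bisect_right per pair of the second half
def bCombine (W : Int) (P0 P1 : List (Int × Int)) : Int :=
  let left := PySem.List.sorted P0 (fun p => p.1)
  let weights := left.map (fun p => p.1)
  let bestTo := (left.foldl (fun (acc : List Int × Option Int) p =>
      let b := match acc.2 with | none => p.2 | some b => max b p.2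
      (acc.1 ++ [b], some b)) (([] : List Int), (none : Option Int))).1
  P1.foldl (fun best p =>
      let i := PySem.List.bisectRight weights (W - p.1)
      if 0 < i then max best (p.2 + bestTo.getD (i - 1) 0) else best) 0

def solve_alt (N : Int) (W : Int) (ws : List Int) (vs : List Int) : Int :=
  let items := ws.zip vs
  let mid := PySem.Int.floordiv N 2
  bCombine W (bEnum W (PySem.List.slice items none (some mid)))
             (bEnum W (PySem.List.slice items (some mid) none))

-- ===== PRECONDITION & SPEC =====
-- Pre_ excludes negative capacities W: there A's merge generator can exhaust its iterator and
-- raise RuntimeError (e.g. N=1, W=-1, ws=[1], vs=[1]); on the W < 0 inputs where A happens to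
-- return, which values survived depends on A's pruning, and no agreement is claimed.
def Pre_solve (N : Int) (W : Int) (ws : List Int) (vs : List Int) : Prop := 0 ≤ W
instance (N : Int) (W : Int) (ws : List Int) (vs : List Int) : Decidable (Pre_solve N W ws vs) := by
  unfold Pre_solve; infer_instance

def pvWitness_solve : Int × Int × List Int × List Int := (4, 5, [2, 3, 1], [4, 1, 2])

def Spec_solve (N : Int) (W : Int) (ws : List Int) (vs : List Int) (out : Int) : Prop := out = solve_alt N W ws vs
instance (N : Int) (W : Int) (ws : List Int) (vs : List Int) (out : Int) : Decidable (Spec_solve N W ws vs out) := by unfold Spec_solve; infer_instance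

-- ===== CLAIM (what is proved, stated in full; the proofs are below) =====
def Claim_equal_solve : Prop := ∀ (N : Int) (W : Int) (ws : List Int) (vs : List Int), Dom_solve N W ws vs → Pre_solve N W ws vs → Spec_solve N W ws vs (solve N W ws vs)

-- ===== LEMMAS AND PROOFS =====

-- run a chosen subset, items as (v, w) (A's orientation)
def runA (W : Int) : Int → Int → List (Int × Int) → Option (Int × Int)
  | tw, tv, [] => some (tw, tv)
  | tw, tv, p :: t => if tw + p.2 > W then none else runA W (tw + p.2) (tv + p.1) t

-- run a chosen subset, items as (w, v) (B's orientation)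
def runP (W : Int) : Int → Int → List (Int × Int) → Option (Int × Int)
  | tw, tv, [] => some (tw, tv)
  | tw, tv, p :: t => if tw + p.1 > W then none else runP W (tw + p.1) (tv + p.2) t

def FeasA (W : Int) (h : List (Int × Int)) (p : Int × Int) : Prop :=
  ∃ s, s.Sublist h ∧ runA W 0 0 s = some p

def FeasP (W : Int) (h : List (Int × Int)) (p : Int × Int) : Prop :=
  ∃ s, s.Sublist h ∧ runP W 0 0 s = some p

-- the candidate values both programs maximise over (h0 h1 in (w, v) orientation)
def Cand (W : Int) (h0 h1 : List (Int × Int)) (x : Int) : Prop :=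
  x = 0 ∨ ∃ p q, FeasP W h0 p ∧ FeasP W h1 q ∧ p.1 + q.1 ≤ W ∧ x = p.2 + q.2

def combineO (o : Option Int) (y : Int) : Int := match o with | some x => max x y | none => y

def D0 : PySem.Dict Int Int := PySem.Dict.ofList [((0 : Int), (0 : Int))]

def RFrom (W : Int) (D : PySem.Dict Int Int) (h : List (Int × Int)) (k vv : Int) : Prop :=
  ∃ d vd s, D.get? d = some vd ∧ s.Sublist h ∧ runA W d vd s = some (k, vv)

-- the subset of h selected by the bits of m (bit 0 = head)
def select : Nat → List (Int × Int) → List (Int × Int)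
  | _, [] => []
  | m, x :: t => if m % 2 = 1 then x :: select (m / 2) t else select (m / 2) t

-- spec of make()'s second loop: running max over sorted keys
def rmaxL (T : PySem.Dict Int Int) : Int → List Int → List (Int × Int)
  | _, [] => []
  | v, k :: ks => (k, max v (T.getD k 0)) :: rmaxL T (max v (T.getD k 0)) ks

-- spec of B's running-max array
def bmaxGo : Int → List (Int × Int) → List Int
  | _, [] => []
  | b, p :: t => max b p.2 :: bmaxGo (max b p.2) t

def bmaxL : List (Int × Int) → List Int
  | [] => []
  | p :: t => p.2 :: bmaxGo p.2 t

-- ---- generic small lemmas ----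

lemma runA_eq_runP (W : Int) : ∀ (s : List (Int × Int)) (tw tv : Int),
    runA W tw tv s = runP W tw tv (s.map Prod.swap) := by
  intro s
  induction s with
  | nil => intro tw tv; rfl
  | cons p t ih =>
      intro tw tv
      simp only [runA, runP, List.map_cons, Prod.swap]
      split_ifs <;> simp_all

lemma runA_shift (W : Int) : ∀ (s : List (Int × Int)) (tw tv : Int),
    runA W tw tv s = (runA W tw 0 s).map (fun p => (p.1, p.2 + tv)) := by
  intro s
  induction s with
  | nil => intro tw tv; simp [runA]
  | cons p t ih =>
      intro tw tv
      simp only [runA]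
      split_ifs with h
      · rfl
      · rw [ih (tw + p.2) (tv + p.1), ih (tw + p.2) (0 + p.1)]
        cases runA W (tw + p.2) 0 t with
        | none => rfl
        | some q => simp [Prod.ext_iff]; omega

lemma runA_fst_le (W : Int) : ∀ (s : List (Int × Int)) (tw tv k vv : Int),
    runA W tw tv s = some (k, vv) → k = tw ∨ k ≤ W := by
  intro s
  induction s with
  | nil => intro tw tv k vv h; simp [runA] at h; exact Or.inl h.1.symm
  | cons p t ih =>
      intro tw tv k vv h
      simp only [runA] at h
      split_ifs at h with hc
      rcases ih _ _ _ _ h with h1 | h1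
      · right; omega
      · right; exact h1

-- ---- dict characterisation (A's make, first loop) ----

lemma nodup_keys_fold_step (W : Int) (v w : Int) :
    ∀ (L : List (Int × Int)) (T0 : PySem.Dict Int Int), T0.keys.Nodup →
    (L.foldl (fun T0 kv =>
        if kv.1 + w > W then T0
        else match T0.get? (kv.1 + w) with
          | some x => T0.insert (kv.1 + w) (max x (kv.2 + v))
          | none => T0.insert (kv.1 + w) (kv.2 + v)) T0).keys.Nodup := by
  intro L
  induction L with
  | nil => intro T0 h; simpa using h
  | cons p L ih =>
      intro T0 h
      simp only [List.foldl_cons]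
      apply ih
      split_ifs with hc
      · exact h
      · cases hg : T0.get? (p.1 + w) with
        | some x => exact PySem.Dict.nodup_keys_insert _ _ _ h
        | none => exact PySem.Dict.nodup_keys_insert _ _ _ h

lemma nodup_keys_aStep (W : Int) (vw : Int × Int) (T : PySem.Dict Int Int)
    (h : T.keys.Nodup) : (aStep W T vw).keys.Nodup := by
  unfold aStep
  exact nodup_keys_fold_step W vw.1 vw.2 T.items T h

lemma stepFold (W v w : Int) (D : PySem.Dict Int Int) :
    ∀ (L : List (Int × Int)) (T0 : PySem.Dict Int Int) (key : Int),
    (L.map Prod.fst).Nodup →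
    (∀ p ∈ L, T0.get? (p.1 + w) = D.get? (p.1 + w)) →
    (∀ p ∈ L, D.get? p.1 = some p.2) →
    (L.foldl (fun T0 kv =>
        if kv.1 + w > W then T0
        else match T0.get? (kv.1 + w) with
          | some x => T0.insert (kv.1 + w) (max x (kv.2 + v))
          | none => T0.insert (kv.1 + w) (kv.2 + v)) T0).get? key =
      if key ≤ W ∧ (key - w) ∈ L.map Prod.fst
      then some (combineO (D.get? key) ((D.get? (key - w)).getD 0 + v))
      else T0.get? key := by
  intro L
  induction L with
  | nil => intro T0 key _ _ _; simp
  | cons p L ih =>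
      intro T0 key h1 h2 h3
      have hnd0 : (p.1 :: L.map Prod.fst).Nodup := by simpa using h1
      have h1' : (L.map Prod.fst).Nodup := (List.nodup_cons.mp hnd0).2
      have hpfst : p.1 ∉ L.map Prod.fst := (List.nodup_cons.mp hnd0).1
      simp only [List.foldl_cons]
      by_cases hk : key = p.1 + w
      · subst hk
        by_cases hW' : p.1 + w ≤ W
        · have hskip : ¬ (p.1 + w > W) := by omega
          have hread : T0.get? (p.1 + w) = D.get? (p.1 + w) := h2 p (List.mem_cons_self)
          have hDp : D.get? p.1 = some p.2 := h3 p (List.mem_cons_self)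
          rw [if_neg hskip]
          have hsub : p.1 + w - w = p.1 := by ring
          cases hg : T0.get? (p.1 + w) with
          | some x =>
              rw [ih (T0.insert (p.1 + w) (max x (p.2 + v))) (p.1 + w) h1'
                (by
                  intro q hq
                  have hne : q.1 + w ≠ p.1 + w := by
                    have hm : q.1 ∈ L.map Prod.fst := List.mem_map_of_mem hq
                    have : q.1 ≠ p.1 := fun he => hpfst (he ▸ hm)
                    omega
                  rw [PySem.Dict.get?_insert_of_ne _ _ hne]
                  exact h2 q (List.mem_cons_of_mem _ hq))
                (fun q hq => h3 q (List.mem_cons_of_mem _ hq))]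
              have hC1 : ¬ (p.1 + w ≤ W ∧ p.1 + w - w ∈ L.map Prod.fst) := by
                rw [hsub]; exact fun hc => hpfst hc.2
              have hC2 : p.1 + w ≤ W ∧ p.1 + w - w ∈ (p :: L).map Prod.fst := by
                rw [hsub]; exact ⟨hW', by simp⟩
              rw [if_neg hC1, if_pos hC2, PySem.Dict.get?_insert_self]
              rw [hread] at hg
              simp [combineO, hg, hsub, hDp]
          | none =>
              rw [ih (T0.insert (p.1 + w) (p.2 + v)) (p.1 + w) h1'
                (by
                  intro q hq
                  have hne : q.1 + w ≠ p.1 + w := by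
                    have hm : q.1 ∈ L.map Prod.fst := List.mem_map_of_mem hq
                    have : q.1 ≠ p.1 := fun he => hpfst (he ▸ hm)
                    omega
                  rw [PySem.Dict.get?_insert_of_ne _ _ hne]
                  exact h2 q (List.mem_cons_of_mem _ hq))
                (fun q hq => h3 q (List.mem_cons_of_mem _ hq))]
              have hC1 : ¬ (p.1 + w ≤ W ∧ p.1 + w - w ∈ L.map Prod.fst) := by
                rw [hsub]; exact fun hc => hpfst hc.2
              have hC2 : p.1 + w ≤ W ∧ p.1 + w - w ∈ (p :: L).map Prod.fst := by
                rw [hsub]; exact ⟨hW', by simp⟩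
              rw [if_neg hC1, if_pos hC2, PySem.Dict.get?_insert_self]
              rw [hread] at hg
              simp [combineO, hg, hsub, hDp]
        · have hskip : p.1 + w > W := by omega
          rw [if_pos hskip]
          rw [ih T0 (p.1 + w) h1' (fun q hq => h2 q (List.mem_cons_of_mem _ hq))
            (fun q hq => h3 q (List.mem_cons_of_mem _ hq))]
          rw [if_neg (fun hc => hW' hc.1), if_neg (fun hc => hW' hc.1)]
      · have hkey : ∀ (T0' : PySem.Dict Int Int), T0' = (if p.1 + w > W then T0
            else match T0.get? (p.1 + w) with
              | some x => T0.insert (p.1 + w) (max x (p.2 + v))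
              | none => T0.insert (p.1 + w) (p.2 + v)) →
            T0'.get? key = T0.get? key ∧ ∀ q ∈ L, T0'.get? (q.1 + w) = D.get? (q.1 + w) := by
          intro T0' hdef
          constructor
          · rw [hdef]; split_ifs with hc
            · rfl
            · cases hg : T0.get? (p.1 + w) with
              | some x => exact PySem.Dict.get?_insert_of_ne _ _ hk
              | none => exact PySem.Dict.get?_insert_of_ne _ _ hk
          · intro q hq
            have hneq : q.1 + w ≠ p.1 + w := by
              have hm : q.1 ∈ L.map Prod.fst := List.mem_map_of_mem hq
              have : q.1 ≠ p.1 := fun he => hpfst (he ▸ hm)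
              omega
            rw [hdef]; split_ifs with hc
            · exact h2 q (List.mem_cons_of_mem _ hq)
            · cases hg : T0.get? (p.1 + w) with
              | some x =>
                  rw [PySem.Dict.get?_insert_of_ne _ _ hneq]
                  exact h2 q (List.mem_cons_of_mem _ hq)
              | none =>
                  rw [PySem.Dict.get?_insert_of_ne _ _ hneq]
                  exact h2 q (List.mem_cons_of_mem _ hq)
        obtain ⟨hkeep, h2'⟩ := hkey _ rfl
        rw [ih _ key h1' h2' (fun q hq => h3 q (List.mem_cons_of_mem _ hq))]
        have hnp : key - w ≠ p.1 := by omega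
        by_cases hcond : key ≤ W ∧ (key - w) ∈ L.map Prod.fst
        · have hC2 : key ≤ W ∧ (key - w) ∈ (p :: L).map Prod.fst :=
            ⟨hcond.1, by simp [hcond.2]⟩
          rw [if_pos hcond, if_pos hC2]
        · have hC2 : ¬ (key ≤ W ∧ (key - w) ∈ (p :: L).map Prod.fst) := by
            rintro ⟨hw1, hw2⟩
            apply hcond
            refine ⟨hw1, ?_⟩
            simp only [List.map_cons, List.mem_cons] at hw2
            rcases hw2 with h | h
            · exact absurd h hnp
            · exact h
          rw [if_neg hcond, if_neg hC2]
          exact hkeep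

lemma get?_aStep (W : Int) (vw : Int × Int) (D : PySem.Dict Int Int) (hnd : D.keys.Nodup)
    (key : Int) :
    (aStep W D vw).get? key =
      if key ≤ W ∧ (key - vw.2) ∈ D.keys
      then some (combineO (D.get? key) ((D.get? (key - vw.2)).getD 0 + vw.1))
      else D.get? key := by
  unfold aStep
  have := stepFold W vw.1 vw.2 D D.items D key
    (by simpa [PySem.Dict.keys] using hnd)
    (fun p _ => rfl)
    (fun p hp => PySem.Dict.get?_of_mem_items D (by simpa using hp) hnd)
  rw [this]
  simp [PySem.Dict.keys]

lemma runA_some_shift (W : Int) (s : List (Int × Int)) (d vd vd' k vv : Int)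
    (h : runA W d vd s = some (k, vv)) : runA W d vd' s = some (k, vv + (vd' - vd)) := by
  rw [runA_shift] at h
  rw [runA_shift W s d vd']
  cases hb : runA W d 0 s with
  | none => rw [hb] at h; exact absurd h (by simp)
  | some q =>
      rw [hb] at h
      simp only [Option.map_some, Option.some.injEq, Prod.mk.injEq] at h ⊢
      obtain ⟨h1, h2⟩ := h
      exact ⟨h1, by omega⟩

lemma dictA_spec (W : Int) : ∀ (h : List (Int × Int)) (D : PySem.Dict Int Int),
    D.keys.Nodup →
    ((h.foldl (aStep W) D).keys.Nodup ∧
     (∀ k vv, (h.foldl (aStep W) D).get? k = some vv → RFrom W D h k vv) ∧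
     (∀ k vv, RFrom W D h k vv → ∃ vv', (h.foldl (aStep W) D).get? k = some vv' ∧ vv ≤ vv')) := by
  intro h
  induction h with
  | nil =>
      intro D hnd
      refine ⟨hnd, ?_, ?_⟩
      · intro k vv hget
        exact ⟨k, vv, [], hget, List.nil_sublist _, rfl⟩
      · rintro k vv ⟨d, vd, s, hD, hs, hrun⟩
        have hse : s = [] := List.sublist_nil.mp hs
        subst hse
        simp only [runA, Option.some.injEq, Prod.mk.injEq] at hrun
        obtain ⟨h1, h2⟩ := hrun
        exact ⟨vv, by rw [List.foldl_nil, ← h1, hD, h2], le_rfl⟩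
  | cons x t ih =>
      intro D hnd
      simp only [List.foldl_cons]
      have hnd' : (aStep W D x).keys.Nodup := nodup_keys_aStep W x D hnd
      obtain ⟨ihnd, ihR1, ihR2⟩ := ih (aStep W D x) hnd'
      refine ⟨ihnd, ?_, ?_⟩
      · -- realizability
        intro k vv hgetk
        obtain ⟨d', vd', s, hD', hs, hrun⟩ := ihR1 k vv hgetk
        rw [get?_aStep W x D hnd d'] at hD'
        split_ifs at hD' with hcond
        · obtain ⟨hdW, hmem⟩ := hcond
          have hu : ∃ u, D.get? (d' - x.2) = some u := by
            cases hg : D.get? (d' - x.2) with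
            | none => exact absurd hmem ((PySem.Dict.get?_eq_none_iff_not_mem_keys _ _).mp hg)
            | some u => exact ⟨u, rfl⟩
          obtain ⟨u, hu⟩ := hu
          rw [hu] at hD'
          cases hDd' : D.get? d' with
          | none =>
              rw [hDd'] at hD'
              simp only [combineO, Option.getD_some, Option.some.injEq] at hD'
              refine ⟨d' - x.2, u, x :: s, hu, hs.cons₂ x, ?_⟩
              simp only [runA]
              rw [if_neg (by omega)]
              have he : d' - x.2 + x.2 = d' := by ring
              rw [he, hD']
              exact hrun
          | some xv =>
              rw [hDd'] at hD'
              simp only [combineO, Option.getD_some, Option.some.injEq] at hD'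
              rcases le_total (u + x.1) xv with hle | hle
              · rw [max_eq_left hle] at hD'
                subst hD'
                exact ⟨d', xv, s, hDd', hs.cons x, hrun⟩
              · rw [max_eq_right hle] at hD'
                subst hD'
                refine ⟨d' - x.2, u, x :: s, hu, hs.cons₂ x, ?_⟩
                simp only [runA]
                rw [if_neg (by omega)]
                have he : d' - x.2 + x.2 = d' := by ring
                rw [he]
                exact hrun
        · exact ⟨d', vd', s, hD', hs.cons x, hrun⟩
      · -- maximality
        rintro k vv ⟨d, vd, s, hD, hs, hrun⟩
        have hdk : d ∈ D.keys := by
          by_contra hnk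
          rw [(PySem.Dict.get?_eq_none_iff_not_mem_keys _ _).mpr hnk] at hD
          exact absurd hD (by simp)
        rcases List.sublist_cons_iff.mp hs with hcase | ⟨r, hr, hrsub⟩
        · -- x not used
          have hbase : ∃ vd', (aStep W D x).get? d = some vd' ∧ vd ≤ vd' := by
            rw [get?_aStep W x D hnd d]
            split_ifs with hc
            · rw [hD]
              exact ⟨_, rfl, le_max_left _ _⟩
            · exact ⟨vd, hD, le_rfl⟩
          obtain ⟨vd', hvd', hle⟩ := hbase
          obtain ⟨vv', hget', hle'⟩ := ihR2 k (vv + (vd' - vd))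
            ⟨d, vd', s, hvd', hcase, runA_some_shift W s d vd vd' k vv hrun⟩
          exact ⟨vv', hget', by omega⟩
        · -- x is the first chosen item
          subst hr
          simp only [runA] at hrun
          split_ifs at hrun with hc
          have hc' : d + x.2 ≤ W := by omega
          have hbase : (aStep W D x).get? (d + x.2) =
              some (combineO (D.get? (d + x.2)) ((D.get? d).getD 0 + x.1)) := by
            rw [get?_aStep W x D hnd (d + x.2)]
            rw [if_pos ⟨hc', by rw [show d + x.2 - x.2 = d by ring]; exact hdk⟩]
            rw [show d + x.2 - x.2 = d by ring]
          have hge : vd + x.1 ≤ combineO (D.get? (d + x.2)) ((D.get? d).getD 0 + x.1) := by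
            rw [hD]
            cases D.get? (d + x.2) with
            | none => simp [combineO]
            | some x0 => simp only [combineO, Option.getD_some]; exact le_trans (by omega) (le_max_right _ _)
          obtain ⟨vv', hget', hle'⟩ := ihR2 k (vv + (combineO (D.get? (d + x.2)) ((D.get? d).getD 0 + x.1) - (vd + x.1)))
            ⟨d + x.2, _, r, hbase, hrsub, runA_some_shift W r (d + x.2) (vd + x.1) _ k vv hrun⟩
          exact ⟨vv', hget', by omega⟩

lemma D0_get? (d : Int) : D0.get? d = if d = 0 then some 0 else none := by
  have he : D0 = (PySem.Dict.empty : PySem.Dict Int Int).insert 0 0 := by rfl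
  rw [he, PySem.Dict.get?_insert]
  split_ifs <;> simp [PySem.Dict.get?_empty]

lemma D0_nodup : D0.keys.Nodup := by decide

-- dictionary entries are exactly the prefix-feasible subset weights with their best values
lemma dictA_feas (W : Int) (S : List (Int × Int)) :
    (S.foldl (aStep W) D0).keys.Nodup ∧
    (∀ k vv, (S.foldl (aStep W) D0).get? k = some vv → FeasA W S (k, vv)) ∧
    (∀ k vv, FeasA W S (k, vv) → ∃ vv', (S.foldl (aStep W) D0).get? k = some vv' ∧ vv ≤ vv') := by
  obtain ⟨hnd, hR1, hR2⟩ := dictA_spec W S D0 D0_nodup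
  refine ⟨hnd, ?_, ?_⟩
  · intro k vv hget
    obtain ⟨d, vd, s, hD, hs, hrun⟩ := hR1 k vv hget
    rw [D0_get? d] at hD
    split_ifs at hD with hd0
    · subst hd0
      simp only [Option.some.injEq] at hD
      rw [← hD] at hrun
      exact ⟨s, hs, hrun⟩
  · rintro k vv ⟨s, hs, hrun⟩
    exact hR2 k vv ⟨0, 0, s, by rw [D0_get?]; simp, hs, hrun⟩

-- ---- make()'s second loop ----

lemma foldl_rmax (T : PySem.Dict Int Int) : ∀ (ks : List Int) (acc : List (Int × Int)) (v : Int),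
    (ks.foldl (fun acc k =>
        let v := max acc.2 (T.getD k 0)
        (acc.1 ++ [(k, v)], v)) (acc, v)).1 = acc ++ rmaxL T v ks := by
  intro ks
  induction ks with
  | nil => intro acc v; simp [rmaxL]
  | cons k ks ih =>
      intro acc v
      simp only [List.foldl_cons, rmaxL]
      rw [ih]
      simp

lemma rmax_fst (T : PySem.Dict Int Int) : ∀ (ks : List Int) (v : Int),
    (rmaxL T v ks).map Prod.fst = ks := by
  intro ks
  induction ks with
  | nil => intro v; simp [rmaxL]
  | cons k ks ih => intro v; simp [rmaxL, ih]

lemma rmax_ge (T : PySem.Dict Int Int) : ∀ (ks : List Int) (v : Int) (p : Int × Int),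
    p ∈ rmaxL T v ks → v ≤ p.2 := by
  intro ks
  induction ks with
  | nil => intro v p hp; simp [rmaxL] at hp
  | cons k ks ih =>
      intro v p hp
      simp only [rmaxL, List.mem_cons] at hp
      rcases hp with hp | hp
      · rw [hp]; exact le_max_left _ _
      · exact le_trans (le_max_left _ _) (ih _ p hp)

lemma rmax_real (T : PySem.Dict Int Int) (K : List Int) :
    ∀ (ks : List Int) (v : Int) (p : Int × Int),
    p ∈ rmaxL T v ks → ks.Pairwise (· ≤ ·) → (∀ k ∈ ks, k ∈ K) →
    (v = 0 ∨ ∃ k' ∈ K, k' ≤ p.1 ∧ T.getD k' 0 = v) →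
    (p.2 = 0 ∨ ∃ k' ∈ K, k' ≤ p.1 ∧ T.getD k' 0 = p.2) := by
  intro ks
  induction ks with
  | nil => intro v p hp; simp [rmaxL] at hp
  | cons k ks ih =>
      intro v p hp hsort hsub hseed
      simp only [rmaxL, List.mem_cons] at hp
      have hsort' : ks.Pairwise (· ≤ ·) := hsort.of_cons
      have hkle : ∀ k' ∈ ks, k ≤ k' := (List.pairwise_cons.mp hsort).1
      have hkK : k ∈ K := hsub k List.mem_cons_self
      have hsub' : ∀ r ∈ ks, r ∈ K := fun r hr => hsub r (List.mem_cons_of_mem _ hr)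
      rcases hp with hp | hp
      · subst hp
        rcases max_choice v (T.getD k 0) with hm | hm
        · rcases hseed with h0 | ⟨k', hk', hle', hv'⟩
          · left; show max v (T.getD k 0) = 0; rw [hm]; exact h0
          · right
            refine ⟨k', hk', hle', ?_⟩
            show T.getD k' 0 = max v (T.getD k 0)
            rw [hm]; exact hv'
        · right
          refine ⟨k, hkK, le_refl k, ?_⟩
          show T.getD k 0 = max v (T.getD k 0)
          rw [hm]
      · have hp1 : p.1 ∈ ks := by
          have := rmax_fst T ks (max v (T.getD k 0))
          rw [← this]
          exact List.mem_map_of_mem hp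
        rcases max_choice v (T.getD k 0) with hm | hm
        · refine ih _ p hp hsort' hsub' ?_
          rw [hm]
          exact hseed
        · refine ih _ p hp hsort' hsub' ?_
          rw [hm]
          exact Or.inr ⟨k, hkK, hkle p.1 hp1, rfl⟩

lemma rmax_dom (T : PySem.Dict Int Int) : ∀ (ks : List Int) (v : Int) (p : Int × Int),
    p ∈ rmaxL T v ks → ks.Pairwise (· ≤ ·) →
    ∀ k' ∈ ks, k' ≤ p.1 → T.getD k' 0 ≤ p.2 := by
  intro ks
  induction ks with
  | nil => intro v p hp; simp [rmaxL] at hp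
  | cons k ks ih =>
      intro v p hp hsort k' hk' hle
      have hsort' : ks.Pairwise (· ≤ ·) := hsort.of_cons
      have hkle : ∀ r ∈ ks, k ≤ r := (List.pairwise_cons.mp hsort).1
      simp only [rmaxL, List.mem_cons] at hp
      rcases hp with hp | hp
      · -- p is the head entry (k, max v (T.getD k 0)); k' ≤ p.1 = k forces k' = k
        have hpk : p.1 = k := by rw [hp]
        rcases List.mem_cons.mp hk' with h | h
        · subst h
          rw [hp]
          exact le_max_right _ _
        · have : k' = k := le_antisymm (hpk ▸ hle) (hkle k' h)
          rw [this, hp]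
          exact le_max_right _ _
      · rcases List.mem_cons.mp hk' with h | h
        · subst h
          have h1 : T.getD k' 0 ≤ max v (T.getD k' 0) := le_max_right _ _
          exact le_trans h1 (rmax_ge T ks _ p hp)
        · exact ih _ p hp hsort' k' h hle

-- ---- A's combine: slide and generator loop ----

lemma aSlide_spec (W k0 : Int) : ∀ (it : List (Int × Int)) (c : Int × Int),
    (∃ z ∈ c :: it, k0 + z.1 ≤ W) →
    ∃ done c' it', aSlide W k0 c it = some (c', it') ∧
      c :: it = done ++ c' :: it' ∧ (∀ p ∈ done, W < k0 + p.1) ∧ k0 + c'.1 ≤ W := by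
  intro it
  induction it with
  | nil =>
      intro c hd
      by_cases h : k0 + c.1 > W
      · exfalso
        obtain ⟨z, hz, hzle⟩ := hd
        simp only [List.mem_cons, List.not_mem_nil, or_false] at hz
        subst hz
        omega
      · exact ⟨[], c, [], by simp [aSlide, h], rfl, by simp, by omega⟩
  | cons p ps ih =>
      intro c hd
      by_cases h : k0 + c.1 > W
      · have hd' : ∃ z ∈ p :: ps, k0 + z.1 ≤ W := by
          obtain ⟨z, hz, hzle⟩ := hd
          rcases List.mem_cons.mp hz with h1 | h1
          · subst h1; omega
          · exact ⟨z, h1, hzle⟩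
        obtain ⟨done, c', it', hsl, heq, hdone, hle⟩ := ih p hd'
        refine ⟨c :: done, c', it', ?_, ?_, ?_, hle⟩
        · rw [aSlide]
          rw [if_pos h]
          exact hsl
        · rw [List.cons_append, ← heq]
        · intro q hq
          rcases List.mem_cons.mp hq with h1 | h1
          · subst h1; omega
          · exact hdone q h1
      · exact ⟨[], c, p :: ps, by rw [aSlide, if_neg h], rfl, by simp, by omega⟩

lemma aGo_spec (W : Int) : ∀ (t0 : List (Int × Int)) (c : Int × Int) (it : List (Int × Int)),
    (c :: it).Pairwise (fun a b => b.1 ≤ a.1) →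
    t0.Pairwise (fun a b => a.1 ≤ b.1) →
    (∀ a ∈ c :: it, ∀ b ∈ c :: it, a.1 ≤ b.1 → a.2 ≤ b.2) →
    (∃ z ∈ c :: it, z.1 ≤ 0) →
    (∀ q ∈ t0, q.1 ≤ W) → 0 ≤ W →
    ∃ ys, aGo W c it t0 = some ys ∧
      (∀ y ∈ ys, ∃ q ∈ t0, ∃ z ∈ c :: it, q.1 + z.1 ≤ W ∧ y = q.2 + z.2) ∧
      (∀ q ∈ t0, ∀ z ∈ c :: it, q.1 + z.1 ≤ W → ∃ y ∈ ys, q.2 + z.2 ≤ y) := by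
  intro t0
  induction t0 with
  | nil =>
      intro c it _ _ _ _ _ _
      exact ⟨[], rfl, by simp, by simp⟩
  | cons q t0 ih =>
      intro c it hdesc hasc hmono hz hle hW
      have hqW : q.1 ≤ W := hle q List.mem_cons_self
      have hd : ∃ z ∈ c :: it, q.1 + z.1 ≤ W := by
        obtain ⟨z, hzm, hz0⟩ := hz
        exact ⟨z, hzm, by omega⟩
      obtain ⟨done, c', it', hslide, heq, hdone, hcle⟩ := aSlide_spec W q.1 it c hd
      have hsubrem : ∀ z ∈ c' :: it', z ∈ c :: it := by
        intro z hzm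
        rw [heq]
        exact List.mem_append_right done hzm
      have hrem_sub : (c' :: it').Sublist (c :: it) := by
        rw [heq]
        exact (List.suffix_append done (c' :: it')).sublist
      have hdesc' : (c' :: it').Pairwise (fun a b => b.1 ≤ a.1) := hdesc.sublist hrem_sub
      have hmono' : ∀ a ∈ c' :: it', ∀ b ∈ c' :: it', a.1 ≤ b.1 → a.2 ≤ b.2 :=
        fun a ha b hb => hmono a (hsubrem a ha) b (hsubrem b hb)
      have hz' : ∃ z ∈ c' :: it', z.1 ≤ 0 := by
        obtain ⟨z, hzm, hz0⟩ := hz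
        rw [heq] at hzm
        rcases List.mem_append.mp hzm with h1 | h1
        · exact absurd (hdone z h1) (by omega)
        · exact ⟨z, h1, hz0⟩
      have hasc' : t0.Pairwise (fun a b => a.1 ≤ b.1) := hasc.of_cons
      have hq_all : ∀ r ∈ t0, q.1 ≤ r.1 := (List.pairwise_cons.mp hasc).1
      obtain ⟨ys, hgo, hatt, hdom⟩ := ih c' it' hdesc' hasc' hmono' hz'
        (fun r hr => hle r (List.mem_cons_of_mem _ hr)) hW
      refine ⟨(q.2 + c'.2) :: ys, ?_, ?_, ?_⟩
      · simp only [aGo, hslide, hgo, Option.map_some]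
      · intro y hy
        rcases List.mem_cons.mp hy with h1 | h1
        · exact ⟨q, List.mem_cons_self, c', hsubrem c' List.mem_cons_self, hcle, h1⟩
        · obtain ⟨r, hr, z, hzm, hsum, hval⟩ := hatt y h1
          exact ⟨r, List.mem_cons_of_mem _ hr, z, hsubrem z hzm, hsum, hval⟩
      · intro r hr z hzm hsum
        rcases List.mem_cons.mp hr with h1 | h1
        · subst h1
          have hzrem : z ∈ c' :: it' := by
            rw [heq] at hzm
            rcases List.mem_append.mp hzm with h2 | h2
            · exact absurd (hdone z h2) (by omega)
            · exact h2
          have hz1 : z.1 ≤ c'.1 := by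
            rcases List.mem_cons.mp hzrem with h2 | h2
            · rw [h2]
            · exact (List.pairwise_cons.mp hdesc').1 z h2
          have hz2 : z.2 ≤ c'.2 := hmono z (hsubrem z hzrem) c' (hsubrem c' List.mem_cons_self) hz1
          exact ⟨r.2 + c'.2, List.mem_cons_self, by omega⟩
        · have hzrem : z ∈ c' :: it' := by
            rw [heq] at hzm
            rcases List.mem_append.mp hzm with h2 | h2
            · have := hdone z h2
              have := hq_all r h1
              omega
            · exact h2
          obtain ⟨y, hy, hley⟩ := hdom r h1 z hzrem hsum
          exact ⟨y, List.mem_cons_of_mem _ hy, hley⟩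

-- ---- sorted2 on pairwise-distinct first components is sort by first key ----

lemma insertBy_congr {α : Type} (f g : α → α → Bool) (x : α) :
    ∀ (l : List α), (∀ y ∈ l, f x y = g x y) → PySem.List.insertBy f x l = PySem.List.insertBy g x l := by
  intro l
  induction l with
  | nil => intro _; rfl
  | cons y ys ih =>
      intro h
      show (if f x y = true then x :: y :: ys else y :: PySem.List.insertBy f x ys) =
        (if g x y = true then x :: y :: ys else y :: PySem.List.insertBy g x ys)
      rw [h y List.mem_cons_self]
      split_ifs with hc
      · rfl
      · rw [ih (fun z hz => h z (List.mem_cons_of_mem _ hz))]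

lemma eq_of_fst_eq : ∀ (xs : List (Int × Int)), (xs.map Prod.fst).Nodup →
    ∀ a b : Int × Int, a ∈ xs → b ∈ xs → a.1 = b.1 → a = b := by
  intro xs
  induction xs with
  | nil => intro _ a b ha; simp at ha
  | cons x t ih =>
      intro hnd a b ha hb hab
      simp only [List.map_cons, List.nodup_cons] at hnd
      obtain ⟨hx, hnd'⟩ := hnd
      rcases List.mem_cons.mp ha with h1 | h1 <;> rcases List.mem_cons.mp hb with h2 | h2
      · rw [h1, h2]
      · exfalso
        apply hx
        subst h1
        rw [hab]
        exact List.mem_map_of_mem h2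
      · exfalso
        apply hx
        subst h2
        rw [← hab]
        exact List.mem_map_of_mem h1
      · exact ih hnd' a b h1 h2 hab

lemma sorted2_eq_sorted_fst (xs : List (Int × Int)) (hnd : (xs.map Prod.fst).Nodup) (rev : Bool) :
    PySem.List.sorted2 xs (fun p => p.1) (fun p => p.2) rev = PySem.List.sorted xs (fun p => p.1) rev := by
  have heqfst : ∀ a b : Int × Int, a ∈ xs → b ∈ xs → a.1 = b.1 → a = b :=
    eq_of_fst_eq xs hnd
  have hcong : ∀ a b : Int × Int, a ∈ xs → b ∈ xs →
      (decide (a.1 < b.1) || (!decide (b.1 < a.1) && decide (a.2 < b.2))) = decide (a.1 < b.1) := by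
    intro a b ha hb
    rcases lt_trichotomy a.1 b.1 with h | h | h
    · simp [h]
    · have : a = b := heqfst a b ha hb h
      subst this
      simp
    · simp [h, not_lt_of_gt h]
  have hfold : ∀ (f g : Int × Int → Int × Int → Bool),
      (∀ a b : Int × Int, a ∈ xs → b ∈ xs → f a b = g a b) →
      ∀ (l acc : List (Int × Int)), (∀ y ∈ l, y ∈ xs) → (∀ y ∈ acc, y ∈ xs) →
      l.foldl (fun acc x => PySem.List.insertBy f x acc) acc =
        l.foldl (fun acc x => PySem.List.insertBy g x acc) acc := by
    intro f g hfg l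
    induction l with
    | nil => intro acc _ _; rfl
    | cons x l ihl =>
        intro acc hl hacc
        simp only [List.foldl_cons]
        have hx : x ∈ xs := hl x List.mem_cons_self
        have hstep : PySem.List.insertBy f x acc = PySem.List.insertBy g x acc :=
          insertBy_congr f g x acc (fun y hy => hfg x y hx (hacc y hy))
        rw [hstep]
        refine ihl _ (fun y hy => hl y (List.mem_cons_of_mem _ hy)) ?_
        intro y hy
        rw [PySem.List.mem_insertBy] at hy
        rcases hy with h | h
        · rw [h]; exact hx
        · exact hacc y h
  cases rev with
  | false =>
      show List.foldl _ [] xs = List.foldl _ [] xs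
      exact hfold _ _ (fun a b ha hb => hcong a b ha hb) xs [] (fun y hy => hy) (by simp)
  | true =>
      show List.foldl _ [] xs = List.foldl _ [] xs
      exact hfold _ _ (fun a b ha hb => hcong b a hb ha) xs [] (fun y hy => hy) (by simp)

-- ---- B: masks enumerate exactly the prefix-feasible subsets ----

lemma bScan_eq_runP (W : Int) : ∀ (h : List (Int × Int)) (mask : Int) (i : Nat) (tw tv : Int),
    0 ≤ mask → bScan W mask h i tw tv = runP W tw tv (select (mask.toNat >>> i) h) := by
  intro h
  induction h with
  | nil => intro mask i tw tv hm; simp [bScan, select, runP]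
  | cons p t ih =>
      intro mask i tw tv hm
      have hsh : (mask >>> i) = ((mask.toNat >>> i : Nat) : Int) := by
        conv_lhs => rw [← Int.toNat_of_nonneg hm]
        rw [← Int.natCast_shiftRight]
      have hband : PySem.Int.band (mask >>> i) 1 = (((mask.toNat >>> i) % 2 : Nat) : Int) := by
        rw [hsh, PySem.Int.band_of_nonneg (by exact_mod_cast Nat.zero_le _) (by norm_num)]
        rw [show ((1 : Int)).toNat = 1 from rfl, Int.toNat_natCast, Nat.and_one_is_mod]
      rw [bScan, select]
      by_cases hbit : (mask.toNat >>> i) % 2 = 1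
      · have hcond : PySem.Int.band (mask >>> i) 1 ≠ 0 := by
          rw [hband, hbit]; norm_num
        rw [if_pos hcond, if_pos hbit, runP]
        split_ifs with hw
        · rfl
        · rw [ih mask (i + 1) _ _ hm, Nat.shiftRight_succ]
      · have h0 : (mask.toNat >>> i) % 2 = 0 := by omega
        have hcond : ¬ PySem.Int.band (mask >>> i) 1 ≠ 0 := by
          rw [hband, h0]; norm_num
        rw [if_neg hcond, if_neg hbit, ih mask (i + 1) tw tv hm, Nat.shiftRight_succ]

lemma select_sublist : ∀ (m : Nat) (h : List (Int × Int)), (select m h).Sublist h := by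
  intro m h
  induction h generalizing m with
  | nil => simp [select]
  | cons x t ih =>
      rw [select]
      split_ifs with hc
      · exact (ih (m / 2)).cons₂ x
      · exact (ih (m / 2)).cons x

lemma sublist_eq_select : ∀ (h s : List (Int × Int)), s.Sublist h →
    ∃ m : Nat, m < 2 ^ h.length ∧ select m h = s := by
  intro h s hs
  induction hs with
  | slnil => exact ⟨0, by simp, rfl⟩
  | @cons s t a _ ih =>
      obtain ⟨m, hm, hsel⟩ := ih
      refine ⟨2 * m, ?_, ?_⟩
      · have : 2 * m < 2 * 2 ^ t.length := by omega
        calc 2 * m < 2 * 2 ^ t.length := this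
          _ = 2 ^ (a :: t).length := by rw [List.length_cons]; ring
      · rw [select, if_neg (by omega)]
        rw [show 2 * m / 2 = m by omega]
        exact hsel
  | @cons₂ s t a _ ih =>
      obtain ⟨m, hm, hsel⟩ := ih
      refine ⟨2 * m + 1, ?_, ?_⟩
      · have : 2 * m + 1 < 2 * 2 ^ t.length := by omega
        calc 2 * m + 1 < 2 * 2 ^ t.length := this
          _ = 2 ^ (a :: t).length := by rw [List.length_cons]; ring
      · rw [select, if_pos (by omega)]
        rw [show (2 * m + 1) / 2 = m by omega]
        rw [hsel]

lemma foldl_opt_append (f : Int → Option (Int × Int)) :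
    ∀ (l : List Int) (acc : List (Int × Int)),
    l.foldl (fun acc mask => match f mask with | some p => acc ++ [p] | none => acc) acc
      = acc ++ l.filterMap f := by
  intro l
  induction l with
  | nil => intro acc; simp
  | cons x l ih =>
      intro acc
      simp only [List.foldl_cons, List.filterMap_cons]
      cases hx : f x with
      | none => dsimp only; exact ih acc
      | some q => dsimp only; rw [ih]; simp

lemma mem_bEnum (W : Int) (h : List (Int × Int)) (p : Int × Int) :
    p ∈ bEnum W h ↔ FeasP W h p := by
  unfold bEnum FeasP
  rw [foldl_opt_append (fun mask => bScan W mask h 0 0 0) _ []]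
  simp only [List.nil_append]
  rw [List.mem_filterMap]
  constructor
  · rintro ⟨mask, hmem, hscan⟩
    have hm0 : 0 ≤ mask := ((PySem.List.mem_pyRange_one).mp hmem).1
    rw [bScan_eq_runP W h mask 0 0 0 hm0, Nat.shiftRight_zero] at hscan
    exact ⟨select mask.toNat h, select_sublist _ _, hscan⟩
  · rintro ⟨s, hsub, hrun⟩
    obtain ⟨m, hmlt, hsel⟩ := sublist_eq_select h s hsub
    refine ⟨(m : Int), ?_, ?_⟩
    · rw [PySem.List.mem_pyRange_one]
      refine ⟨by exact_mod_cast Nat.zero_le m, ?_⟩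
      rw [Int.shiftLeft_eq, one_mul]
      exact_mod_cast hmlt
    · rw [bScan_eq_runP W h _ 0 0 0 (by exact_mod_cast Nat.zero_le m), Nat.shiftRight_zero,
        Int.toNat_natCast, hsel]
      exact hrun

-- ---- B: the running-max array ----

lemma foldl_bmax : ∀ (l : List (Int × Int)) (acc : List Int) (b : Int),
    (l.foldl (fun (acc : List Int × Option Int) p =>
        let b := match acc.2 with | none => p.2 | some b => max b p.2
        (acc.1 ++ [b], some b)) (acc, some b)).1 = acc ++ bmaxGo b l := by
  intro l
  induction l with
  | nil => intro acc b; simp [bmaxGo]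
  | cons p t ih =>
      intro acc b
      show (t.foldl (fun (acc : List Int × Option Int) p =>
          let b := match acc.2 with | none => p.2 | some b => max b p.2
          (acc.1 ++ [b], some b)) (acc ++ [max b p.2], some (max b p.2))).1 = acc ++ bmaxGo b (p :: t)
      rw [ih, bmaxGo]
      simp

lemma foldl_bmax_none : ∀ (l : List (Int × Int)),
    (l.foldl (fun (acc : List Int × Option Int) p =>
        let b := match acc.2 with | none => p.2 | some b => max b p.2
        (acc.1 ++ [b], some b)) (([] : List Int), (none : Option Int))).1 = bmaxL l := by
  intro l
  cases l with
  | nil => rfl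
  | cons p t =>
      show (t.foldl (fun (acc : List Int × Option Int) p =>
          let b := match acc.2 with | none => p.2 | some b => max b p.2
          (acc.1 ++ [b], some b)) (([] : List Int) ++ [p.2], some p.2)).1 = bmaxL (p :: t)
      rw [foldl_bmax, bmaxL]
      simp

lemma bmaxGo_length : ∀ (l : List (Int × Int)) (b : Int), (bmaxGo b l).length = l.length := by
  intro l
  induction l with
  | nil => intro b; rfl
  | cons p t ih => intro b; simp [bmaxGo, ih]

lemma bmax_length : ∀ (l : List (Int × Int)), (bmaxL l).length = l.length := by
  intro l
  cases l with
  | nil => rfl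
  | cons p t => simp [bmaxL, bmaxGo_length]

lemma bmax_spec : ∀ (l : List (Int × Int)) (i : Nat), i < l.length →
    ((∃ p ∈ l.take (i + 1), (bmaxL l).getD i 0 = p.2) ∧
     (∀ p ∈ l.take (i + 1), p.2 ≤ (bmaxL l).getD i 0)) := by
  have bmaxGo_spec : ∀ (t : List (Int × Int)) (b : Int) (i : Nat), i < t.length →
      (((bmaxGo b t).getD i 0 = b ∨ ∃ p ∈ t.take (i + 1), (bmaxGo b t).getD i 0 = p.2) ∧
       b ≤ (bmaxGo b t).getD i 0 ∧
       (∀ p ∈ t.take (i + 1), p.2 ≤ (bmaxGo b t).getD i 0)) := by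
    intro t
    induction t with
    | nil => intro b i hi; simp at hi
    | cons p t ih =>
        intro b i hi
        cases i with
        | zero =>
            simp only [bmaxGo, List.getD_cons_zero, List.take_succ_cons, List.take_zero]
            refine ⟨?_, le_max_left _ _, ?_⟩
            · rcases max_choice b p.2 with hm | hm
              · exact Or.inl hm
              · exact Or.inr ⟨p, by simp, hm⟩
            · intro q hq
              simp only [List.mem_cons, List.not_mem_nil, or_false] at hq
              rw [hq]
              exact le_max_right _ _
        | succ i =>
            have hi' : i < t.length := by simpa using hi
            obtain ⟨hatt, hge, hdom⟩ := ih (max b p.2) i hi'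
            simp only [bmaxGo, List.getD_cons_succ, List.take_succ_cons]
            refine ⟨?_, le_trans (le_max_left _ _) hge, ?_⟩
            · rcases hatt with h | ⟨q, hq, hval⟩
              · rcases max_choice b p.2 with hm | hm
                · left; rw [h, hm]
                · right; exact ⟨p, List.mem_cons_self, by rw [h, hm]⟩
              · right; exact ⟨q, List.mem_cons_of_mem _ hq, hval⟩
            · intro q hq
              rcases List.mem_cons.mp hq with h | h
              · rw [h]; exact le_trans (le_max_right _ _) hge
              · exact hdom q h
  intro l i hi
  cases l with
  | nil => simp at hi
  | cons p t =>
      cases i with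
      | zero =>
          simp only [bmaxL, List.getD_cons_zero, List.take_succ_cons, List.take_zero]
          refine ⟨⟨p, by simp, rfl⟩, ?_⟩
          intro q hq
          simp only [List.mem_cons, List.not_mem_nil, or_false] at hq
          rw [hq]
      | succ i =>
          have hi' : i < t.length := by simpa using hi
          obtain ⟨hatt, hge, hdom⟩ := bmaxGo_spec t p.2 i hi'
          simp only [bmaxL, List.getD_cons_succ, List.take_succ_cons]
          constructor
          · rcases hatt with h | ⟨q, hq, hval⟩
            · exact ⟨p, List.mem_cons_self, h⟩
            · exact ⟨q, List.mem_cons_of_mem _ hq, hval⟩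
          · intro q hq
            rcases List.mem_cons.mp hq with h | h
            · rw [h]; exact hge
            · exact hdom q h

-- ---- the two combines agree with the candidate maximum ----

lemma cand_zero (W : Int) (h0 h1 : List (Int × Int)) : Cand W h0 h1 0 := Or.inl rfl

lemma aCombine_spec (W : Int) (hW : 0 ≤ W) (h0 h1 : List (Int × Int)) (R0 R1 : List (Int × Int))
    (hf0 : R0.Pairwise (fun a b => a.1 < b.1)) (hf1 : R1.Pairwise (fun a b => a.1 < b.1))
    (hreal0 : ∀ p ∈ R0, p.2 = 0 ∨ ∃ q, FeasP W h0 q ∧ q.1 ≤ p.1 ∧ q.2 = p.2)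
    (hreal1 : ∀ p ∈ R1, p.2 = 0 ∨ ∃ q, FeasP W h1 q ∧ q.1 ≤ p.1 ∧ q.2 = p.2)
    (hdom0 : ∀ p ∈ R0, ∀ q, FeasP W h0 q → q.1 ≤ p.1 → q.2 ≤ p.2)
    (hdom1 : ∀ p ∈ R1, ∀ q, FeasP W h1 q → q.1 ≤ p.1 → q.2 ≤ p.2)
    (hkey0 : ∀ q, FeasP W h0 q → ∃ p ∈ R0, p.1 = q.1)
    (hkey1 : ∀ q, FeasP W h1 q → ∃ p ∈ R1, p.1 = q.1)
    (hle0 : ∀ p ∈ R0, p.1 ≤ W) (hle1 : ∀ p ∈ R1, p.1 ≤ W)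
    (hz1 : ∃ p ∈ R1, p.1 = 0)
    (hpos0 : ∀ p ∈ R0, 0 ≤ p.2) (hpos1 : ∀ p ∈ R1, 0 ≤ p.2) :
    Cand W h0 h1 (aCombine W R0 R1) ∧ ∀ x, Cand W h0 h1 x → x ≤ aCombine W R0 R1 := by
  have hnd0 : (R0.map Prod.fst).Nodup := (List.pairwise_map.mpr hf0).imp ne_of_lt
  have hnd1 : (R1.map Prod.fst).Nodup := (List.pairwise_map.mpr hf1).imp ne_of_lt
  have ht0mem : ∀ p, p ∈ PySem.List.sorted R0 (fun p => p.1) ↔ p ∈ R0 :=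
    fun p => PySem.List.mem_sorted R0 (fun p => p.1) false p
  have ht1mem : ∀ p, p ∈ PySem.List.sorted R1 (fun p => p.1) true ↔ p ∈ R1 :=
    fun p => PySem.List.mem_sorted R1 (fun p => p.1) true p
  have ht0asc : (PySem.List.sorted R0 (fun p => p.1)).Pairwise (fun a b => a.1 ≤ b.1) :=
    PySem.List.sorted_pairwise R0 (fun p => p.1)
  have ht1desc : (PySem.List.sorted R1 (fun p => p.1) true).Pairwise (fun a b => b.1 ≤ a.1) :=
    PySem.List.sorted_pairwise_rev R1 (fun p => p.1)
  have ht1ne : PySem.List.sorted R1 (fun p => p.1) true ≠ [] := by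
    obtain ⟨p0, hp0, _⟩ := hz1
    intro hnil
    have := (ht1mem p0).mpr hp0
    rw [hnil] at this
    simp at this
  obtain ⟨c, it, htc⟩ := List.exists_cons_of_ne_nil ht1ne
  have hmono : ∀ a ∈ c :: it, ∀ b ∈ c :: it, a.1 ≤ b.1 → a.2 ≤ b.2 := by
    intro a ha b hb hab
    have haR : a ∈ R1 := (ht1mem a).mp (htc ▸ ha)
    have hbR : b ∈ R1 := (ht1mem b).mp (htc ▸ hb)
    rcases hreal1 a haR with h0v | ⟨u, hu, hule, huv⟩
    · rw [h0v]; exact hpos1 b hbR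
    · rw [← huv]
      exact hdom1 b hbR u hu (by omega)
  have hzz : ∃ z ∈ c :: it, z.1 ≤ 0 := by
    obtain ⟨p0, hp0, hp00⟩ := hz1
    have : p0 ∈ c :: it := htc ▸ (ht1mem p0).mpr hp0
    exact ⟨p0, this, le_of_eq hp00⟩
  have hdesc' : (c :: it).Pairwise (fun a b => b.1 ≤ a.1) := htc ▸ ht1desc
  have hleq : ∀ q ∈ PySem.List.sorted R0 (fun p => p.1), q.1 ≤ W :=
    fun q hq => hle0 q ((ht0mem q).mp hq)
  obtain ⟨ys, hgo, hatt, hdomgo⟩ :=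
    aGo_spec W (PySem.List.sorted R0 (fun p => p.1)) c it hdesc' ht0asc hmono hzz hleq hW
  have hval : aCombine W R0 R1 = ys.foldl max 0 := by
    simp only [aCombine]
    rw [sorted2_eq_sorted_fst R0 hnd0 false, sorted2_eq_sorted_fst R1 hnd1 true, htc]
    dsimp only
    rw [hgo]
    dsimp only
    rw [PySem.List.max?_id_cons]
    rfl
  rw [hval]
  constructor
  · rcases PySem.List.foldl_max_mem ys 0 with h | h
    · rw [h]; exact cand_zero W h0 h1
    · obtain ⟨q, hq, z, hzm, hsum, hvy⟩ := hatt _ h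
      have hqR : q ∈ R0 := (ht0mem q).mp hq
      have hzR : z ∈ R1 := (ht1mem z).mp (htc ▸ hzm)
      rcases hreal0 q hqR with hq0 | ⟨u0, hu0, hu0le, hu0v⟩ <;>
        rcases hreal1 z hzR with hz0 | ⟨u1, hu1, hu1le, hu1v⟩
      · left; omega
      · right
        refine ⟨(0, 0), u1, ⟨[], List.nil_sublist _, rfl⟩, hu1, ?_, ?_⟩
        · show (0 : Int) + u1.1 ≤ W
          have hz1W : z.1 ≤ W := hle1 z hzR
          omega
        · show ys.foldl max 0 = 0 + u1.2
          omega
      · right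
        refine ⟨u0, (0, 0), hu0, ⟨[], List.nil_sublist _, rfl⟩, ?_, ?_⟩
        · show u0.1 + 0 ≤ W
          have hq1W : q.1 ≤ W := hle0 q hqR
          omega
        · show ys.foldl max 0 = u0.2 + 0
          omega
      · right
        exact ⟨u0, u1, hu0, hu1, by omega, by omega⟩
  · intro x hx
    rcases hx with hx0 | ⟨p, q, hfp, hfq, hsum, hxval⟩
    · rw [hx0]; exact (PySem.List.le_foldl_max ys 0).1
    · obtain ⟨e0, he0, he0k⟩ := hkey0 p hfp
      obtain ⟨e1, he1, he1k⟩ := hkey1 q hfq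
      have hpe0 : p.2 ≤ e0.2 := hdom0 e0 he0 p hfp (le_of_eq he0k.symm)
      have hqe1 : q.2 ≤ e1.2 := hdom1 e1 he1 q hfq (le_of_eq he1k.symm)
      have he0t : e0 ∈ PySem.List.sorted R0 (fun p => p.1) := (ht0mem e0).mpr he0
      have he1t : e1 ∈ c :: it := htc ▸ (ht1mem e1).mpr he1
      obtain ⟨y, hy, hley⟩ := hdomgo e0 he0t e1 he1t (by omega)
      have hyle : y ≤ ys.foldl max 0 := (PySem.List.le_foldl_max ys 0).2 y hy
      omega

lemma bCombine_spec (W : Int) (hW : 0 ≤ W) (h0 h1 : List (Int × Int)) :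
    Cand W h0 h1 (bCombine W (bEnum W h0) (bEnum W h1)) ∧
    ∀ x, Cand W h0 h1 x → x ≤ bCombine W (bEnum W h0) (bEnum W h1) := by
  simp only [bCombine]
  rw [foldl_bmax_none]
  set L := PySem.List.sorted (bEnum W h0) (fun p => p.1) with hL
  set Wts := L.map (fun p => p.1) with hWts
  set BT := bmaxL L with hBT
  have hwsort : Wts.Pairwise (· ≤ ·) := by
    rw [hWts, hL]
    exact PySem.List.sorted_map_key_pairwise (bEnum W h0) (fun p => p.1)
  have hBTlen : BT.length = L.length := by rw [hBT]; exact bmax_length L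
  have hWlen : Wts.length = L.length := by rw [hWts]; exact List.length_map _
  have hmemL : ∀ p, p ∈ L ↔ FeasP W h0 p := by
    intro p
    rw [hL, PySem.List.mem_sorted]
    exact mem_bEnum W h0 p
  have hfun : (fun (best : Int) (p : Int × Int) =>
      let i := PySem.List.bisectRight Wts (W - p.1)
      if 0 < i then max best (p.2 + BT.getD (i - 1) 0) else best) =
      (fun (best : Int) (p : Int × Int) =>
        if 0 < PySem.List.bisectRight Wts (W - p.1) then
          max best (p.2 + BT.getD (PySem.List.bisectRight Wts (W - p.1) - 1) 0) else best) := rfl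
  rw [hfun]
  have fold_spec : ∀ (idx : Int × Int → Nat) (g : Int × Int → Int) (l : List (Int × Int)) (init : Int),
      (init ≤ l.foldl (fun best p => if 0 < idx p then max best (g p) else best) init) ∧
      ((l.foldl (fun best p => if 0 < idx p then max best (g p) else best) init) = init ∨
        ∃ p ∈ l, 0 < idx p ∧
          (l.foldl (fun best p => if 0 < idx p then max best (g p) else best) init) = g p) ∧
      (∀ p ∈ l, 0 < idx p →
        g p ≤ (l.foldl (fun best p => if 0 < idx p then max best (g p) else best) init)) := by
    intro idx g l
    induction l with
    | nil => intro init; exact ⟨le_rfl, Or.inl rfl, by simp⟩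
    | cons p t ih =>
        intro init
        simp only [List.foldl_cons]
        by_cases hip : 0 < idx p
        · rw [if_pos hip]
          obtain ⟨ih1, ih2, ih3⟩ := ih (max init (g p))
          refine ⟨le_trans (le_max_left _ _) ih1, ?_, ?_⟩
          · rcases ih2 with hh | ⟨q, hq, hiq, hvalq⟩
            · rcases max_choice init (g p) with hm | hm
              · left; rw [hh, hm]
              · right; exact ⟨p, List.mem_cons_self, hip, by rw [hh, hm]⟩
            · right; exact ⟨q, List.mem_cons_of_mem _ hq, hiq, hvalq⟩
          · intro q hq hiq
            rcases List.mem_cons.mp hq with hh | hh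
            · rw [hh]; exact le_trans (le_max_right _ _) ih1
            · exact ih3 q hh hiq
        · rw [if_neg hip]
          obtain ⟨ih1, ih2, ih3⟩ := ih init
          refine ⟨ih1, ?_, ?_⟩
          · rcases ih2 with hh | ⟨q, hq, hiq, hvalq⟩
            · exact Or.inl hh
            · exact Or.inr ⟨q, List.mem_cons_of_mem _ hq, hiq, hvalq⟩
          intro q hq hiq
          rcases List.mem_cons.mp hq with hh | hh
          · rw [hh] at hiq; exact absurd hiq hip
          · exact ih3 q hh hiq
  obtain ⟨hge0, hatt, hdomf⟩ := fold_spec (fun p => PySem.List.bisectRight Wts (W - p.1))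
    (fun p => p.2 + BT.getD (PySem.List.bisectRight Wts (W - p.1) - 1) 0) (bEnum W h1) 0
  constructor
  · rcases hatt with hh | ⟨q, hq, hiq, hvalq⟩
    · rw [hh]; exact cand_zero W h0 h1
    · have hspec := PySem.List.bisectRight_spec Wts (W - q.1) hwsort
      set i := PySem.List.bisectRight Wts (W - q.1) with hi
      have hile : i ≤ L.length := by rw [← hWlen]; exact hspec.1
      have hi1 : i - 1 < L.length := by omega
      obtain ⟨⟨p, hpmem, hpval⟩, _⟩ := bmax_spec L (i - 1) hi1
      have hpval' : BT.getD (i - 1) 0 = p.2 := hpval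
      have hii : i - 1 + 1 = i := by omega
      rw [hii] at hpmem
      obtain ⟨j, hj, hLj⟩ := List.getElem_of_mem hpmem
      have hjmin : j < min i L.length := by simpa [List.length_take] using hj
      have hjlen : j < L.length := by omega
      have hji : j < i := by omega
      have hLj' : L[j]'hjlen = p := by
        rw [← hLj, List.getElem_take]
      have hwj : Wts[j]'(by rw [hWlen]; exact hjlen) = p.1 := by
        simp only [hWts, List.getElem_map]
        rw [hLj']
      have hwle : p.1 ≤ W - q.1 := by
        have := hspec.2.1 j (by rw [hWlen]; exact hjlen) hji
        rw [hwj] at this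
        exact this
      refine Or.inr ⟨p, q, (hmemL p).mp (List.mem_of_mem_take hpmem),
        (mem_bEnum W h1 q).mp hq, by omega, by omega⟩
  · intro x hx
    rcases hx with hx0 | ⟨p, q, hfp, hfq, hsum, hxval⟩
    · rw [hx0]; exact hge0
    · have hpL : p ∈ L := (hmemL p).mpr hfp
      obtain ⟨j, hjlen, hLj⟩ := List.getElem_of_mem hpL
      have hspec := PySem.List.bisectRight_spec Wts (W - q.1) hwsort
      set i := PySem.List.bisectRight Wts (W - q.1) with hi
      have hwj : Wts[j]'(by rw [hWlen]; exact hjlen) = p.1 := by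
        simp only [hWts, List.getElem_map]
        rw [hLj]
      have hji : j < i := by
        by_contra hnj
        have := hspec.2.2 j (by rw [hWlen]; exact hjlen) (by omega)
        rw [hwj] at this
        omega
      have hipos : 0 < i := by omega
      have hile : i ≤ L.length := by rw [← hWlen]; exact hspec.1
      have hi1 : i - 1 < L.length := by omega
      obtain ⟨_, hdomB⟩ := bmax_spec L (i - 1) hi1
      have hii : i - 1 + 1 = i := by omega
      rw [hii] at hdomB
      have hptake : p ∈ L.take i := by
        have hjt : j < (L.take i).length := by
          simp only [List.length_take]
          omega
        have hgt : (L.take i)[j]'hjt = p := by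
          rw [List.getElem_take]
          exact hLj
        rw [← hgt]
        exact List.getElem_mem _
      have hple : p.2 ≤ BT.getD (i - 1) 0 := hdomB p hptake
      have hcontrib := hdomf q ((mem_bEnum W h1 q).mpr hfq) hipos
      rw [← hi] at hcontrib
      omega

-- make()'s output satisfies every hypothesis of aCombine_spec (h = the swapped item list)
lemma aMake_spec (W : Int) (hW : 0 ≤ W) (S : List (Int × Int)) :
    (aMake W S).Pairwise (fun a b => a.1 < b.1) ∧
    (∀ p ∈ aMake W S, p.2 = 0 ∨ ∃ q, FeasP W (S.map Prod.swap) q ∧ q.1 ≤ p.1 ∧ q.2 = p.2) ∧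
    (∀ p ∈ aMake W S, ∀ q, FeasP W (S.map Prod.swap) q → q.1 ≤ p.1 → q.2 ≤ p.2) ∧
    (∀ q, FeasP W (S.map Prod.swap) q → ∃ p ∈ aMake W S, p.1 = q.1) ∧
    (∀ p ∈ aMake W S, p.1 ≤ W) ∧ (∃ p ∈ aMake W S, p.1 = 0) ∧
    (∀ p ∈ aMake W S, 0 ≤ p.2) := by
  obtain ⟨hnd, hC1, hC2⟩ := dictA_feas W S
  have hfeasAP : ∀ p : Int × Int, FeasA W S p ↔ FeasP W (S.map Prod.swap) p := by
    intro p
    constructor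
    · rintro ⟨s, hs, hrun⟩
      exact ⟨s.map Prod.swap, hs.map _, by rw [← runA_eq_runP]; exact hrun⟩
    · rintro ⟨s', hs', hrun⟩
      refine ⟨s'.map Prod.swap, ?_, ?_⟩
      · have := hs'.map Prod.swap
        simpa [List.map_map, Function.comp, Prod.swap_swap] using this
      · rw [runA_eq_runP]
        simpa [List.map_map, Function.comp, Prod.swap_swap] using hrun
  simp only [aMake]
  rw [foldl_rmax]
  simp only [List.nil_append]
  set T := S.foldl (aStep W) D0 with hT
  set ks := PySem.List.sorted T.keys (fun k => k) with hks
  have hksperm : ks.Perm T.keys := PySem.List.sorted_perm T.keys (fun k => k) false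
  have hkssorted : ks.Pairwise (· ≤ ·) := PySem.List.sorted_pairwise T.keys (fun k => k)
  have hksnodup : ks.Nodup := (hksperm.nodup_iff).mpr hnd
  have hksstrict : ks.Pairwise (· < ·) :=
    (hkssorted.and hksnodup).imp (fun h => lt_of_le_of_ne h.1 h.2)
  have hget_of_mem_ks : ∀ k, k ∈ ks → T.get? k = some (T.getD k 0) := by
    intro k hk
    have hmemkeys : k ∈ T.keys := hksperm.mem_iff.mp hk
    cases hu : T.get? k with
    | none => exact absurd hmemkeys ((PySem.Dict.get?_eq_none_iff_not_mem_keys _ _).mp hu)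
    | some u => rw [PySem.Dict.getD_eq_get?_getD, hu]; rfl
  have hmem_ks_of_get : ∀ k vv, T.get? k = some vv → k ∈ ks := by
    intro k vv hg
    apply hksperm.mem_iff.mpr
    by_contra hnk
    rw [(PySem.Dict.get?_eq_none_iff_not_mem_keys _ _).mpr hnk] at hg
    exact absurd hg (by simp)
  set R := rmaxL T 0 ks with hR
  have hRfst : R.map Prod.fst = ks := rmax_fst T ks 0
  refine ⟨?_, ?_, ?_, ?_, ?_, ?_, ?_⟩
  · -- strictly increasing first components
    rw [← hRfst] at hksstrict
    exact List.pairwise_map.mp hksstrict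
  · -- realizability
    intro p hp
    rcases rmax_real T ks ks 0 p hp hkssorted (fun k hk => hk) (Or.inl rfl) with h0 | ⟨k', hk', hle', hv'⟩
    · exact Or.inl h0
    · right
      have hg : T.get? k' = some p.2 := by rw [hget_of_mem_ks k' hk', hv']
      exact ⟨(k', p.2), (hfeasAP (k', p.2)).mp (hC1 k' p.2 hg), hle', rfl⟩
  · -- domination
    intro p hp q hfeas hle
    obtain ⟨vv', hget', hle'⟩ := hC2 q.1 q.2 (by
      have := (hfeasAP (q.1, q.2)).mpr (by simpa using hfeas)
      simpa using this)
    have hk' : q.1 ∈ ks := hmem_ks_of_get q.1 vv' hget'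
    have hdom := rmax_dom T ks 0 p hp hkssorted q.1 hk' hle
    rw [PySem.Dict.getD_eq_get?_getD, hget'] at hdom
    exact le_trans hle' hdom
  · -- every feasible weight appears
    intro q hfeas
    obtain ⟨vv', hget', _⟩ := hC2 q.1 q.2 (by
      have := (hfeasAP (q.1, q.2)).mpr (by simpa using hfeas)
      simpa using this)
    have hk' : q.1 ∈ ks := hmem_ks_of_get q.1 vv' hget'
    rw [← hRfst] at hk'
    obtain ⟨p, hp, hpe⟩ := List.mem_map.mp hk'
    exact ⟨p, hp, hpe⟩
  · -- keys bounded by W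
    intro p hp
    have hk : p.1 ∈ ks := by rw [← hRfst]; exact List.mem_map_of_mem hp
    have hg := hget_of_mem_ks p.1 hk
    obtain ⟨s, hs, hrun⟩ := hC1 p.1 (T.getD p.1 0) hg
    rcases runA_fst_le W s 0 0 p.1 (T.getD p.1 0) hrun with h | h
    · omega
    · exact h
  · -- the 0 key is present
    obtain ⟨vv', hget', _⟩ := hC2 0 0 ⟨[], List.nil_sublist _, rfl⟩
    have hk : (0 : Int) ∈ ks := hmem_ks_of_get 0 vv' hget'
    rw [← hRfst] at hk
    obtain ⟨p, hp, hpe⟩ := List.mem_map.mp hk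
    exact ⟨p, hp, hpe⟩
  · -- values nonnegative
    intro p hp
    exact rmax_ge T ks 0 p hp

lemma cand_unique (W : Int) (h0 h1 : List (Int × Int)) (r r' : Int)
    (h1c : Cand W h0 h1 r) (h1d : ∀ x, Cand W h0 h1 x → x ≤ r)
    (h2c : Cand W h0 h1 r') (h2d : ∀ x, Cand W h0 h1 x → x ≤ r') : r = r' :=
  le_antisymm (h2d r h1c) (h1d r' h2c)

lemma slice_map_swap (l : List (Int × Int)) (a b : Option Int) :
    PySem.List.slice (l.map Prod.swap) a b = (PySem.List.slice l a b).map Prod.swap := by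
  cases a <;> cases b <;>
    simp [PySem.List.slice, List.map_take, List.map_drop]

-- ===== VERDICT (by name: the statement is the Claim_ definition above) =====
theorem solve_spec : Claim_equal_solve := by
  intro N W ws vs _hdom hpre
  unfold Spec_solve
  have hW : 0 ≤ W := hpre
  show solve N W ws vs = solve_alt N W ws vs
  simp only [solve, solve_alt]
  set mid := PySem.Int.floordiv N 2 with hmid
  set S := vs.zip ws with hS
  have hitems : ws.zip vs = S.map Prod.swap := (List.zip_swap vs ws).symm
  have h0 : PySem.List.slice (ws.zip vs) none (some mid) = (PySem.List.slice S none (some mid)).map Prod.swap := by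
    rw [hitems, slice_map_swap]
  have h1 : PySem.List.slice (ws.zip vs) (some mid) none = (PySem.List.slice S (some mid) none).map Prod.swap := by
    rw [hitems, slice_map_swap]
  rw [h0, h1]
  obtain ⟨a1, a2, a3, a4, a5, a6, a7⟩ := aMake_spec W hW (PySem.List.slice S none (some mid))
  obtain ⟨b1, b2, b3, b4, b5, b6, b7⟩ := aMake_spec W hW (PySem.List.slice S (some mid) none)
  have hac := aCombine_spec W hW ((PySem.List.slice S none (some mid)).map Prod.swap)
    ((PySem.List.slice S (some mid) none).map Prod.swap)
    (aMake W (PySem.List.slice S none (some mid))) (aMake W (PySem.List.slice S (some mid) none))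
    a1 b1 a2 b2 a3 b3 a4 b4 a5 b5 b6 a7 b7
  have hbc := bCombine_spec W hW ((PySem.List.slice S none (some mid)).map Prod.swap)
    ((PySem.List.slice S (some mid) none).map Prod.swap)
  exact cand_unique W _ _ _ _ hac.1 hac.2 hbc.1 hbc.2
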